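-- pv_equiv track=rewrite | github.com/qaz027/zzPractice | products_array.py | solution
-- ===== SOURCE A (Python) =====
-- def solution(numbers):
--     n = len(numbers)
--     mid = n // 2
--     products = []
--
--     if n % 2 == 1:
--         # middle of the numbers array has no opposite
--         left = mid - 1
--         right = mid + 1
--         products = [numbers[mid]]
--
--     else:
--         left = mid - 1
--         right = mid
--         products = []
--
--     while left >= 0 and right < n:
--         products.append(numbers[right]*numbers[left])
--         left -= 1
--         right += 1
--     return products
-- ===== SOURCE B (Python) =====
-- def solution(numbers):
--     n = len(numbers)
--     pairs = [a * b for a, b in zip(numbers, reversed(numbers))]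
--     mid = n // 2
--     return ([numbers[mid]] if n % 2 else []) + pairs[:mid][::-1]
-- ===== Notes on version B (the rewrite author's own statement) =====
-- stated objective: alternative
-- what changed: B builds the whole list of symmetric products in one zip against the reversed list, then takes the first half reversed (plus the raw middle element for odd length), instead of A's stateful two-pointer while-loop walking outward from the center.
import Mathlib
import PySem

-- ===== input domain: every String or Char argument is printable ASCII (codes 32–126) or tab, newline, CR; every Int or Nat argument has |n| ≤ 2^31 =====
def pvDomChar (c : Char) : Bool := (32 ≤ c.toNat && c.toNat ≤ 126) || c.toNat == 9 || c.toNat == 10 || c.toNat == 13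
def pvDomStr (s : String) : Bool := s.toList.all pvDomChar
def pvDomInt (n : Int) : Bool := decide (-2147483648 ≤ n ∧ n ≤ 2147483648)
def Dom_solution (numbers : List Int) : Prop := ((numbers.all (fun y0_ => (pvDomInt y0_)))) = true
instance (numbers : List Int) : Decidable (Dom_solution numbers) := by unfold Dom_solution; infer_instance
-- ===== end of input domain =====

-- B replaces A's two-pointer outward while-loop by one zip-with-reverse product list,
-- taking its first half reversed (plus the raw middle element for odd length); alternative decomposition.


-- ===== PORT A =====
-- the while-loop; indices are always in range when taken, so pyGetD is exact here
def solLoop (numbers : List Int) (n left right : Int) (products : List Int) : List Int :=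
  if _h : left ≥ 0 ∧ right < n then
    solLoop numbers n (left - 1) (right + 1)
      (products ++ [PySem.List.pyGetD numbers right 0 * PySem.List.pyGetD numbers left 0])
  else products
termination_by (left + 1).toNat
decreasing_by omega

def solution (numbers : List Int) : List Int :=
  let n : Int := numbers.length
  let mid : Int := PySem.Int.floordiv n 2
  if PySem.Int.mod n 2 = 1 then
    solLoop numbers n (mid - 1) (mid + 1) [PySem.List.pyGetD numbers mid 0]
  else
    solLoop numbers n (mid - 1) mid []

-- ===== PORT B =====
def solution_alt (numbers : List Int) : List Int :=
  let n := numbers.length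
  let pairs := (numbers.zip numbers.reverse).map fun p => p.1 * p.2
  let mid := n / 2
  (if n % 2 = 1 then [PySem.List.pyGetD numbers (mid : Int) 0] else []) ++ (pairs.take mid).reverse

-- ===== PRECONDITION & SPEC =====
def Spec_solution (numbers : List Int) (out : List Int) : Prop := out = solution_alt numbers
instance (numbers : List Int) (out : List Int) : Decidable (Spec_solution numbers out) := by unfold Spec_solution; infer_instance

-- ===== CLAIM (what is proved, stated in full; the proofs are below) =====
def Claim_equal_solution : Prop := ∀ (numbers : List Int), Dom_solution numbers → Spec_solution numbers (solution numbers)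

-- ===== LEMMAS AND PROOFS =====
def pvPairs (numbers : List Int) : List Int :=
  (numbers.zip numbers.reverse).map fun p => p.1 * p.2

lemma pvPairs_length (numbers : List Int) : (pvPairs numbers).length = numbers.length := by
  simp [pvPairs]

lemma pvPairs_get (numbers : List Int) (k : Nat) (hk : k < numbers.length) :
    (pvPairs numbers)[k]'(by simp [pvPairs_length]; omega) =
      numbers[numbers.length - 1 - k]'(by omega) * numbers[k] := by
  simp [pvPairs, List.getElem_reverse]
  exact mul_comm _ _

lemma loop_eq (numbers : List Int) (L : Nat) (hL : L ≤ numbers.length) (acc : List Int) :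
    solLoop numbers numbers.length ((L : Int) - 1) ((numbers.length : Int) - L) acc
      = acc ++ ((pvPairs numbers).take L).reverse := by
  induction L generalizing acc with
  | zero =>
    rw [solLoop]
    simp
  | succ L ih =>
    rw [solLoop]
    have hcond : ((L : Int) + 1 - 1 ≥ 0 ∧ (numbers.length : Int) - (L + 1) < numbers.length) := by
      constructor <;> omega
    rw [dif_pos (by exact_mod_cast hcond)]
    push_cast only [Nat.cast_add, Nat.cast_one]
    have hL' : L < numbers.length := by omega
    have e1 : ((L : Int) + 1 - 1 - 1) = (L : Int) - 1 := by ring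
    have e2 : ((numbers.length : Int) - ((L : Nat) + 1) + 1) = (numbers.length : Int) - L := by
      ring
    have hgr : PySem.List.pyGetD numbers ((numbers.length : Int) - ((L : Nat) + 1)) 0
        = numbers[numbers.length - 1 - L]'(by omega) := by
      have : ((numbers.length : Int) - ((L : Nat) + 1)) = ((numbers.length - 1 - L : Nat) : Int) := by
        omega
      rw [this, PySem.List.pyGetD_natCast]
      exact List.getD_eq_getElem _ _ (by omega)
    have hgl : PySem.List.pyGetD numbers ((L : Int) + 1 - 1) 0 = numbers[L] := by
      have : ((L : Int) + 1 - 1) = ((L : Nat) : Int) := by ring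
      rw [this, PySem.List.pyGetD_natCast]
      exact List.getD_eq_getElem _ _ hL'
    rw [e1, e2, hgr, hgl, ih (by omega)]
    have htake : (pvPairs numbers).take (L + 1)
        = (pvPairs numbers).take L ++ [(pvPairs numbers)[L]'(by rw [pvPairs_length]; omega)] := by
      rw [List.take_add_one]
      simp [List.getElem?_eq_getElem (by rw [pvPairs_length]; omega : L < (pvPairs numbers).length)]
    rw [htake, pvPairs_get numbers L hL']
    simp

lemma solution_eq_alt (numbers : List Int) : solution numbers = solution_alt numbers := by
  simp only [solution, solution_alt]
  have hmid : PySem.Int.floordiv (numbers.length : Int) 2 = ((numbers.length / 2 : Nat) : Int) :=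
    PySem.Int.floordiv_natCast _ 2
  have hmod : PySem.Int.mod (numbers.length : Int) 2 = ((numbers.length % 2 : Nat) : Int) :=
    PySem.Int.mod_natCast _ 2
  by_cases hodd : numbers.length % 2 = 1
  · rw [hmod, hmid]
    have hif : (((numbers.length % 2 : Nat) : Int) = 1) := by rw [hodd]; norm_num
    rw [if_pos hif, if_pos hodd]
    have key := loop_eq numbers (numbers.length / 2) (Nat.div_le_self _ _)
      [PySem.List.pyGetD numbers ((numbers.length / 2 : Nat) : Int) 0]
    have e : (numbers.length : Int) - ((numbers.length / 2 : Nat) : Int)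
        = ((numbers.length / 2 : Nat) : Int) + 1 := by
      have := Nat.div_add_mod numbers.length 2
      omega
    rw [e] at key
    exact key
  · rw [hmod, hmid]
    have hif : ¬(((numbers.length % 2 : Nat) : Int) = 1) := by
      intro h; exact hodd (by exact_mod_cast h)
    rw [if_neg hif, if_neg hodd]
    have key := loop_eq numbers (numbers.length / 2) (Nat.div_le_self _ _) []
    have e : (numbers.length : Int) - ((numbers.length / 2 : Nat) : Int)
        = ((numbers.length / 2 : Nat) : Int) := by
      have := Nat.div_add_mod numbers.length 2
      have h2 : numbers.length % 2 = 0 := by omega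
      omega
    rw [e] at key
    exact key

-- ===== VERDICT (by name: the statement is the Claim_ definition above) =====
theorem solution_spec : Claim_equal_solution := by
  intro numbers _
  unfold Spec_solution
  exact solution_eq_alt numbers
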